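-- pv_equiv track=rewrite | github.com/danilohsales/Quest-es-python | QUESTÕES PY/30.py | inverte_subseq
-- ===== SOURCE A (Python) =====
-- def inverte_subseq(seq, ini, count):
--
--     copia = []
--     for i in range(count):
--         copia.append(seq[ini + i])
--
--     for i in range(count // 2):
--         primeiro = ini + i
--         ultimo = ini + count - 1 - i
--
--         seq[primeiro], seq[ultimo] = seq[ultimo], seq[primeiro]
--
--
--     return copia
-- ===== SOURCE B (Python) =====
-- def inverte_subseq(seq, ini, count):
--     # Single descending while-loop read (indices count-1 .. 0), then reverse
--     # the collected list in place to get the original-order copy; reverse the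
--     # segment by writing that copy back mirrored.
--     copia = []
--     i = count - 1
--     while i >= 0:
--         copia.append(seq[ini + i])
--         i -= 1
--     copia.reverse()
--     for j in range(count):
--         seq[ini + j] = copia[count - 1 - j]
--     return copia
-- ===== Notes on version B (the rewrite author's own statement) =====
-- stated objective: alternative
-- what changed: B replaces A's ascending for-loop copy plus half-pass pairwise swap with a descending while-loop read (collected back-to-front, then reversed to form the returned copy) and a full-pass mirrored writeback of that copy into the segment.
import Mathlib
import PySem

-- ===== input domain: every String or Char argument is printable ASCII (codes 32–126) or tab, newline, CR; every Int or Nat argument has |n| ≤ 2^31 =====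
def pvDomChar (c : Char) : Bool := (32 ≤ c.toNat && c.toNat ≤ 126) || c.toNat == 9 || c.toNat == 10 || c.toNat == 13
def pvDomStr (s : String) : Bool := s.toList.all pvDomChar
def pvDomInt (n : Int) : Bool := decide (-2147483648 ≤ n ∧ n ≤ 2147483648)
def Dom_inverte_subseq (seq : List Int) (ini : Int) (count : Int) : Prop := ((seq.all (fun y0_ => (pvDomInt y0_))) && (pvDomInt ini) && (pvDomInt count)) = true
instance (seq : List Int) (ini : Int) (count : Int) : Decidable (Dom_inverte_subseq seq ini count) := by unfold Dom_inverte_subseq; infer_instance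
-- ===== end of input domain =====

-- B reads the subsequence with one descending while loop (collecting it back-to-front,
-- then reversing the collected list to obtain the returned copy) and reverses the
-- segment by a mirrored full-pass writeback, instead of A's ascending copy loop plus
-- half-pass pairwise swaps (objective: alternative). Both Pythons mutate seq in place;
-- the equivalence proved here is about the RETURN value only (the in-place effects
-- coincide except on negative-index windows that alias a position twice). Out-of-range
-- reads (Python IndexError) are excluded by Pre_, so pyGetD's default 0 is never
-- reached on admitted inputs.

-- ===== PORT A =====
-- copia = []; for i in range(count): copia.append(seq[ini + i]); (swap loop mutates seq only); return copia
def inverte_subseq (seq : List Int) (ini : Int) (count : Int) : List Int :=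
  (PySem.List.pyRange 0 count 1).foldl
    (fun copia i => copia ++ [PySem.List.pyGetD seq (ini + i) 0]) []

-- ===== PORT B =====
-- the descending while loop: i counts down from count-1 to 0, appending seq[ini + i]
def inverte_subseq_loop (seq : List Int) (ini : Int) (i : Int) (copia : List Int) : List Int :=
  if 0 ≤ i then
    inverte_subseq_loop seq ini (i - 1) (copia ++ [PySem.List.pyGetD seq (ini + i) 0])
  else copia
termination_by (i + 1).toNat
decreasing_by omega

-- copia = []; i = count-1; while i >= 0: copia.append(seq[ini+i]); i -= 1;
-- copia.reverse(); (writeback loop mutates seq only); return copia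
def inverte_subseq_alt (seq : List Int) (ini : Int) (count : Int) : List Int :=
  (inverte_subseq_loop seq ini (count - 1) []).reverse

-- ===== PRECONDITION & SPEC =====
-- Pre_ excludes exactly the inputs where Python A raises IndexError: some read index
-- ini+i (0 ≤ i < count) falls outside [-len(seq), len(seq)). B raises on the same inputs.
def Pre_inverte_subseq (seq : List Int) (ini : Int) (count : Int) : Prop :=
  count ≤ 0 ∨ (-(seq.length : Int) ≤ ini ∧ ini + count ≤ (seq.length : Int))
instance (seq : List Int) (ini : Int) (count : Int) : Decidable (Pre_inverte_subseq seq ini count) := by unfold Pre_inverte_subseq; infer_instance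
def pvWitness_inverte_subseq : List Int × Int × Int := ([1, 2, 3, 4], 1, 2)
def Spec_inverte_subseq (seq : List Int) (ini : Int) (count : Int) (out : List Int) : Prop := out = inverte_subseq_alt seq ini count
instance (seq : List Int) (ini : Int) (count : Int) (out : List Int) : Decidable (Spec_inverte_subseq seq ini count out) := by unfold Spec_inverte_subseq; infer_instance

-- ===== CLAIM (what is proved, stated in full; the proofs are below) =====
def Claim_equal_inverte_subseq : Prop := ∀ (seq : List Int) (ini : Int) (count : Int), Dom_inverte_subseq seq ini count → Pre_inverte_subseq seq ini count → Spec_inverte_subseq seq ini count (inverte_subseq seq ini count)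

-- ===== LEMMAS AND PROOFS =====

-- folding "append a singleton" over a list is map
theorem foldl_append_singleton {α β : Type} (g : α → β) :
    ∀ (l : List α) (acc : List β),
      l.foldl (fun a i => a ++ [g i]) acc = acc ++ l.map g := by
  intro l
  induction l with
  | nil => intro acc; simp
  | cons x xs ih => intro acc; simp [List.foldl, ih]

-- the descending while loop appends exactly the segment read back-to-front
theorem inverte_subseq_loop_eq (seq : List Int) (ini : Int) :
    ∀ (n : Nat) (i : Int) (copia : List Int), (i + 1).toNat = n →
      inverte_subseq_loop seq ini i copia
        = copia ++ (PySem.List.pyRange i (-1) (-1)).map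
            (fun j => PySem.List.pyGetD seq (ini + j) 0) := by
  intro n
  induction n with
  | zero =>
    intro i copia h
    have hi : i ≤ -1 := by omega
    rw [inverte_subseq_loop, if_neg (by omega),
      PySem.List.pyRange_neg_one_eq_nil hi]
    simp
  | succ m ih =>
    intro i copia h
    have hi : 0 ≤ i := by omega
    rw [inverte_subseq_loop, if_pos hi, ih (i - 1) _ (by omega),
      PySem.List.pyRange_neg_one_cons (by omega : (-1 : Int) < i)]
    simp

-- ===== VERDICT (by name: the statement is the Claim_ definition above) =====
theorem inverte_subseq_spec : Claim_equal_inverte_subseq := by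
  intro seq ini count _ _
  unfold Spec_inverte_subseq inverte_subseq inverte_subseq_alt
  rw [foldl_append_singleton,
    inverte_subseq_loop_eq seq ini (count - 1 + 1).toNat (count - 1) [] rfl]
  have h : PySem.List.pyRange (count - 1) (-1) (-1)
      = (PySem.List.pyRange 0 count 1).reverse := by
    have := PySem.List.pyRange_neg_one_eq_reverse (count - 1) (-1)
    simpa using this
  simp [h, List.map_reverse]
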